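-- pv_equiv track=rewrite | github.com/brennonatal/snake-game | snake_rl/utils.py | get_free_positions
-- ===== SOURCE A (Python) =====
-- from typing import Any, Dict, List, Tuple, Optional
--
-- def get_free_positions(snake_positions: List[Tuple[int, int]],
--                       grid_size: Tuple[int, int]) -> List[Tuple[int, int]]:
--     """Get list of free positions on the grid.
--
--     Args:
--         snake_positions: List of snake segment positions
--         grid_size: Grid dimensions (width, height)
--
--     Returns:
--         List of free positions
--     """
--     width, height = grid_size
--     occupied = set(snake_positions)
--
--     free_positions = []
--     for x in range(width):
--         for y in range(height):
--             if (x, y) not in occupied: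
--                 free_positions.append((x, y))
--
--     return free_positions
-- ===== SOURCE B (Python) =====
-- def get_free_positions(snake_positions, grid_size):
--     """Emit free cells as the runs between consecutive occupied linear indices."""
--     width, height = grid_size
--     if width <= 0 or height <= 0:
--         return []
--     occupied = sorted({x * height + y
--                        for (x, y) in snake_positions
--                        if 0 <= x < width and 0 <= y < height})
--     free = []
--     prev = 0
--     for idx in occupied:
--         free.extend(divmod(i, height) for i in range(prev, idx))
--         prev = idx + 1
--     free.extend(divmod(i, height) for i in range(prev, width * height))
--     return free
-- ===== Notes on version B (the rewrite author's own statement) =====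
-- stated objective: alternative
-- what changed: B never tests per-cell membership: it sorts the deduplicated in-grid snake cells by linear index x*height+y and emits the free cells as the runs between consecutive occupied indices, recovering (x,y) by divmod.
import Mathlib
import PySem

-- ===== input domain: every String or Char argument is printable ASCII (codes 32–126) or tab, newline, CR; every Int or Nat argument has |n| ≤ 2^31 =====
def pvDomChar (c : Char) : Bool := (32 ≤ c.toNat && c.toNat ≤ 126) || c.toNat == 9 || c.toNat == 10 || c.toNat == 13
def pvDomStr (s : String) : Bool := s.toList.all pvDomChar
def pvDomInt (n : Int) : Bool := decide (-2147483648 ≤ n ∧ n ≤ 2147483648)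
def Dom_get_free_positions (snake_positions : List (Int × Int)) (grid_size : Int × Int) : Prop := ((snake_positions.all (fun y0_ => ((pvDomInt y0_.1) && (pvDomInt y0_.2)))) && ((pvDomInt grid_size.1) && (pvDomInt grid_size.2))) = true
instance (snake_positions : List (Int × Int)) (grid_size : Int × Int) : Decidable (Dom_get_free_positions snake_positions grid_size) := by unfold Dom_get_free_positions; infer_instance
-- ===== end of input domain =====

-- B replaces the per-cell membership test of A by sorting the in-grid snake cells by
-- linear index and emitting the free cells as the runs between consecutive occupied
-- indices (alternative algorithm; same output order).

-- ===== PORT A =====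
def get_free_positions (snake_positions : List (Int × Int)) (grid_size : Int × Int) : List (Int × Int) :=
  let width := grid_size.1
  let height := grid_size.2
  let occupied := PySem.Set.ofList snake_positions
  (PySem.List.pyRange 0 width 1).foldl (fun acc x =>
    (PySem.List.pyRange 0 height 1).foldl (fun acc y =>
      if (x, y) ∉ occupied then acc ++ [(x, y)] else acc) acc) []

-- ===== PORT B =====
def get_free_positions_alt (snake_positions : List (Int × Int)) (grid_size : Int × Int) : List (Int × Int) :=
  let width := grid_size.1
  let height := grid_size.2
  if width ≤ 0 ∨ height ≤ 0 then []
  else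
    let occupied :=
      PySem.List.sorted
        (PySem.Set.ofList
          ((snake_positions.filter (fun p =>
              decide (0 ≤ p.1) && decide (p.1 < width) && decide (0 ≤ p.2) && decide (p.2 < height))).map
            (fun p => p.1 * height + p.2)))
        (fun i => i) false
    let st := occupied.foldl
      (fun (st : List (Int × Int) × Int) idx =>
        (st.1 ++ (PySem.List.pyRange st.2 idx 1).map
            (fun i => (PySem.Int.floordiv i height, PySem.Int.mod i height)), idx + 1))
      ([], 0)
    st.1 ++ (PySem.List.pyRange st.2 (width * height) 1).map
        (fun i => (PySem.Int.floordiv i height, PySem.Int.mod i height))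

-- ===== PRECONDITION & SPEC =====
def Spec_get_free_positions (snake_positions : List (Int × Int)) (grid_size : Int × Int) (out : List (Int × Int)) : Prop := out = get_free_positions_alt snake_positions grid_size
instance (snake_positions : List (Int × Int)) (grid_size : Int × Int) (out : List (Int × Int)) : Decidable (Spec_get_free_positions snake_positions grid_size out) := by unfold Spec_get_free_positions; infer_instance

-- ===== CLAIM (what is proved, stated in full; the proofs are below) =====
def Claim_equal_get_free_positions : Prop := ∀ (snake_positions : List (Int × Int)) (grid_size : Int × Int), Dom_get_free_positions snake_positions grid_size → Spec_get_free_positions snake_positions grid_size (get_free_positions snake_positions grid_size)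

-- ===== LEMMAS AND PROOFS =====

-- the full grid in x-major, y-minor order
def pvGrid (width height : Int) : List (Int × Int) :=
  (PySem.List.pyRange 0 width 1).flatMap (fun x =>
    (PySem.List.pyRange 0 height 1).map (fun y => (x, y)))

-- ---- A's nested loops produce the filtered grid ----

theorem inner_loop_eq (occ : List (Int × Int)) (x : Int) :
    ∀ (ys : List Int) (acc : List (Int × Int)),
      (ys.foldl (fun acc y => if (x, y) ∉ occ then acc ++ [(x, y)] else acc) acc : List (Int × Int)) =
        acc ++ (ys.map (fun y => (x, y))).filter (fun p => !occ.contains p) := by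
  intro ys
  induction ys with
  | nil => intro acc; simp
  | cons y ys ih =>
    intro acc
    rw [List.foldl_cons, List.map_cons, List.filter_cons]
    by_cases hmem : (x, y) ∈ occ
    · rw [if_neg (not_not_intro hmem), ih]
      simp [hmem]
    · rw [if_pos hmem, ih]
      simp [hmem]

theorem portA_eq_filter_grid (snake_positions : List (Int × Int)) (width height : Int) :
    get_free_positions snake_positions (width, height) =
      (pvGrid width height).filter (fun p => !snake_positions.contains p) := by
  unfold get_free_positions pvGrid
  simp only []
  have hmem : ∀ p : Int × Int, (p ∈ PySem.Set.ofList snake_positions) ↔ p ∈ snake_positions :=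
    fun p => PySem.Set.mem_ofList snake_positions p
  have hfn : ∀ (acc : List (Int × Int)) (x : Int),
      ((PySem.List.pyRange 0 height 1).foldl
        (fun acc y => if (x, y) ∉ PySem.Set.ofList snake_positions then acc ++ [(x, y)] else acc) acc) =
        acc ++ ((PySem.List.pyRange 0 height 1).map (fun y => (x, y))).filter
          (fun p => !snake_positions.contains p) := by
    intro acc x
    rw [show (fun acc y => if (x, y) ∉ PySem.Set.ofList snake_positions then acc ++ [(x, y)] else acc)
        = (fun acc y => if (x, y) ∉ snake_positions then acc ++ [(x, y)] else acc) from ?_]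
    · exact inner_loop_eq snake_positions x (PySem.List.pyRange 0 height 1) acc
    · funext acc y
      by_cases hmem' : (x, y) ∈ snake_positions
      · simp [hmem', (hmem (x, y)).mpr hmem']
      · simp [hmem']
  calc (PySem.List.pyRange 0 width 1).foldl
        (fun acc x => (PySem.List.pyRange 0 height 1).foldl
          (fun acc y => if (x, y) ∉ PySem.Set.ofList snake_positions then acc ++ [(x, y)] else acc) acc) []
      = (PySem.List.pyRange 0 width 1).foldl
        (fun acc x => acc ++ ((PySem.List.pyRange 0 height 1).map (fun y => (x, y))).filter
          (fun p => !snake_positions.contains p)) [] := by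
        refine List.foldl_ext _ _ _ ?_
        intro acc x _
        exact hfn acc x
    _ = (PySem.List.pyRange 0 width 1).flatMap
          (fun x => ((PySem.List.pyRange 0 height 1).map (fun y => (x, y))).filter
            (fun p => !snake_positions.contains p)) := by
        simpa using PySem.List.foldl_append_eq_flatMap
          (fun x => ((PySem.List.pyRange 0 height 1).map (fun y => (x, y))).filter
            (fun p => !snake_positions.contains p))
          (PySem.List.pyRange 0 width 1) []
    _ = _ := by rw [List.filter_flatMap]

theorem pvGrid_nil_of_nonpos (width height : Int) (h : width ≤ 0 ∨ height ≤ 0) :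
    pvGrid width height = [] := by
  unfold pvGrid
  rcases h with h | h
  · rw [PySem.List.pyRange_one_eq_nil h]; rfl
  · rw [PySem.List.pyRange_one_eq_nil h]
    simp

-- ---- B's run emission produces the filtered index range ----

theorem runs_eq (f : Int → Int × Int) :
    ∀ (occ : List Int) (acc : List (Int × Int)) (lo N : Int),
      occ.Pairwise (· < ·) → (∀ i ∈ occ, lo ≤ i ∧ i < N) →
      ((occ.foldl (fun (st : List (Int × Int) × Int) idx =>
          (st.1 ++ (PySem.List.pyRange st.2 idx 1).map f, idx + 1)) (acc, lo)).1
        ++ (PySem.List.pyRange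
              (occ.foldl (fun (st : List (Int × Int) × Int) idx =>
                (st.1 ++ (PySem.List.pyRange st.2 idx 1).map f, idx + 1)) (acc, lo)).2 N 1).map f)
      = acc ++ ((PySem.List.pyRange lo N 1).filter (fun i => !occ.contains i)).map f := by
  intro occ
  induction occ with
  | nil =>
    intro acc lo N _ _
    simp [List.filter_eq_self.mpr]
  | cons idx rest ih =>
    intro acc lo N hpw hbd
    have hidx : lo ≤ idx ∧ idx < N := hbd idx (by simp)
    have hrest_gt : ∀ j ∈ rest, idx < j := (List.pairwise_cons.mp hpw).1
    have hrest_pw : rest.Pairwise (· < ·) := (List.pairwise_cons.mp hpw).2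
    have hrest_bd : ∀ j ∈ rest, idx + 1 ≤ j ∧ j < N := by
      intro j hj
      exact ⟨by have := hrest_gt j hj; omega, (hbd j (by simp [hj])).2⟩
    rw [List.foldl_cons]
    rw [ih (acc ++ (PySem.List.pyRange lo idx 1).map f) (idx + 1) N hrest_pw hrest_bd]
    -- split the range at idx and idx+1
    rw [PySem.List.pyRange_one_append lo idx N hidx.1 (by omega)]
    rw [PySem.List.pyRange_one_cons hidx.2]
    rw [List.filter_append, List.filter_cons]
    have h1 : (PySem.List.pyRange lo idx 1).filter (fun i => !(idx :: rest).contains i)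
        = PySem.List.pyRange lo idx 1 := by
      refine List.filter_eq_self.mpr ?_
      intro i hi
      have hlt : i < idx := (PySem.List.mem_pyRange_one.mp hi).2
      have h2 : i ∉ rest := fun hmem => by have := hrest_gt i hmem; omega
      simp only [List.contains_cons]
      simp [h2, show i ≠ idx by omega]
    have h3 : (PySem.List.pyRange (idx + 1) N 1).filter (fun i => !(idx :: rest).contains i)
        = (PySem.List.pyRange (idx + 1) N 1).filter (fun i => !rest.contains i) := by
      refine List.filter_congr ?_
      intro i hi
      have : idx + 1 ≤ i := (PySem.List.mem_pyRange_one.mp hi).1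
      simp only [List.contains_cons]
      simp [show i ≠ idx by omega]
    rw [h1, h3]
    simp [List.append_assoc]

-- ---- index arithmetic: divmod of x*h + y and membership transfer ----

theorem pv_divmod_of_cell (x y h : Int) (hy0 : 0 ≤ y) (hyh : y < h) :
    (x * h + y) / h = x ∧ (x * h + y) % h = y := by
  have hh : h ≠ 0 := by omega
  constructor
  · rw [add_comm, Int.add_mul_ediv_right y x hh, Int.ediv_eq_zero_of_lt hy0 hyh]
    omega
  · rw [add_comm, Int.add_mul_emod_self_right, Int.emod_eq_of_lt hy0 hyh]

-- the full grid is the divmod image of the linear index range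
theorem grid_eq_map (h : Int) (hh : 0 < h) :
    ∀ (w : Nat), pvGrid (w : Int) h
      = (PySem.List.pyRange 0 ((w : Int) * h) 1).map (fun i => (i / h, i % h)) := by
  intro w
  induction w with
  | zero => simp [pvGrid, PySem.List.pyRange_one_eq_nil]
  | succ w ih =>
    have hw0 : (0 : Int) ≤ (w : Int) * h := by positivity
    have hsplit : PySem.List.pyRange 0 (((w : Nat) + 1 : Nat) : Int) 1
        = PySem.List.pyRange 0 (w : Int) 1 ++ [(w : Int)] := by
      push_cast
      exact PySem.List.pyRange_one_succ_right (by positivity)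
    have hgrid : pvGrid ((w : Nat) + 1 : Nat) h
        = pvGrid (w : Int) h ++ (PySem.List.pyRange 0 h 1).map (fun y => ((w : Int), y)) := by
      unfold pvGrid
      rw [hsplit, List.flatMap_append]
      simp
    rw [hgrid, ih]
    have hrange : PySem.List.pyRange 0 ((((w : Nat) + 1 : Nat) : Int) * h) 1
        = PySem.List.pyRange 0 ((w : Int) * h) 1
          ++ PySem.List.pyRange ((w : Int) * h) ((w : Int) * h + h) 1 := by
      push_cast
      rw [show ((w : Int) + 1) * h = (w : Int) * h + h by ring]
      exact PySem.List.pyRange_one_append 0 ((w : Int) * h) ((w : Int) * h + h) hw0 (by omega)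
    rw [hrange, List.map_append]
    congr 1
    rw [PySem.List.pyRange_one ((w : Int) * h) ((w : Int) * h + h),
        PySem.List.pyRange_one 0 h, List.map_map, List.map_map]
    have harg : ((w : Int) * h + h - (w : Int) * h).toNat = (h - 0).toNat := by omega
    rw [harg]
    refine List.map_congr_left ?_
    intro k hk
    have hkh : (k : Int) < h := by
      have := List.mem_range.mp hk
      omega
    obtain ⟨hd, hm⟩ := pv_divmod_of_cell (w : Int) (k : Int) h (by positivity) hkh
    show ((w : Int), 0 + (k : Int)) = (((w : Int) * h + (k : Int)) / h, ((w : Int) * h + (k : Int)) % h)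
    rw [hd, hm]
    simp

-- i is an occupied linear index iff its cell is a snake cell (for in-range i)
theorem pv_mem_occ_iff (snake_positions : List (Int × Int)) (width height i : Int)
    (hh : 0 < height) (hi0 : 0 ≤ i) (hiN : i < width * height) :
    (i ∈ (snake_positions.filter (fun p =>
        decide (0 ≤ p.1) && decide (p.1 < width) && decide (0 ≤ p.2) && decide (p.2 < height))).map
      (fun p => p.1 * height + p.2))
      ↔ (i / height, i % height) ∈ snake_positions := by
  constructor
  · intro hmem
    obtain ⟨p, hp, hpi⟩ := List.mem_map.mp hmem
    obtain ⟨hpmem, hpcond⟩ := List.mem_filter.mp hp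
    simp only [Bool.and_eq_true, decide_eq_true_eq] at hpcond
    obtain ⟨⟨⟨hc1, hc2⟩, hc3⟩, hc4⟩ := hpcond
    have := pv_divmod_of_cell p.1 p.2 height hc3 hc4
    rw [← hpi, this.1, this.2]
    exact hpmem
  · intro hmem
    refine List.mem_map.mpr ⟨(i / height, i % height), List.mem_filter.mpr ⟨hmem, ?_⟩, ?_⟩
    · have h1 : 0 ≤ i / height := Int.ediv_nonneg hi0 (by omega)
      have h2 : i / height < width := (Int.ediv_lt_iff_lt_mul hh).mpr hiN
      have h3 : 0 ≤ i % height := Int.emod_nonneg i (by omega)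
      have h4 : i % height < height := Int.emod_lt_of_pos i hh
      simp [h1, h2, h3, h4]
    · show i / height * height + i % height = i
      have := Int.mul_ediv_add_emod i height
      rw [mul_comm]
      omega

theorem portB_eq_filter_grid (snake_positions : List (Int × Int)) (width height : Int) :
    get_free_positions_alt snake_positions (width, height) =
      (pvGrid width height).filter (fun p => !snake_positions.contains p) := by
  unfold get_free_positions_alt
  simp only []
  by_cases hnp : width ≤ 0 ∨ height ≤ 0
  · rw [if_pos hnp, pvGrid_nil_of_nonpos width height hnp]
    rfl
  · rw [if_neg hnp]
    have hw : 0 < width := by omega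
    have hh : 0 < height := by omega
    -- the occupied linear indices, sorted and distinct
    set idxs := (snake_positions.filter (fun p =>
        decide (0 ≤ p.1) && decide (p.1 < width) && decide (0 ≤ p.2) && decide (p.2 < height))).map
      (fun p => p.1 * height + p.2) with hidxs
    set occ := PySem.List.sorted (PySem.Set.ofList idxs) (fun i => i) false with hocc
    have hpw : occ.Pairwise (· < ·) := PySem.List.sorted_ofList_pairwise_lt idxs
    have hmemocc : ∀ i, i ∈ occ ↔ i ∈ idxs := by
      intro i
      rw [hocc, PySem.List.mem_sorted, PySem.Set.mem_ofList]
    have hbd : ∀ i ∈ occ, (0 : Int) ≤ i ∧ i < width * height := by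
      intro i hi
      obtain ⟨p, hp, hpi⟩ := List.mem_map.mp ((hmemocc i).mp hi)
      obtain ⟨_, hpcond⟩ := List.mem_filter.mp hp
      simp only [Bool.and_eq_true, decide_eq_true_eq] at hpcond
      obtain ⟨⟨⟨h1, h2⟩, h3⟩, h4⟩ := hpcond
      constructor
      · rw [← hpi]; positivity
      · rw [← hpi]
        nlinarith [mul_le_mul_of_nonneg_right (show p.1 + 1 ≤ width by omega) (le_of_lt hh)]
    -- replace floordiv/mod by ediv/emod (height > 0)
    have hfun : (fun i => (PySem.Int.floordiv i height, PySem.Int.mod i height))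
        = (fun i => (i / height, i % height)) := by
      funext i
      rw [PySem.Int.floordiv_eq_ediv_of_pos hh, PySem.Int.mod_eq_emod_of_pos hh]
    rw [hfun]
    rw [runs_eq (fun i => (i / height, i % height)) occ [] 0 (width * height) hpw hbd]
    rw [List.nil_append]
    -- transfer the index filter to the cell filter
    have hfilter : (PySem.List.pyRange 0 (width * height) 1).filter (fun i => !occ.contains i)
        = (PySem.List.pyRange 0 (width * height) 1).filter
            (fun i => !snake_positions.contains (i / height, i % height)) := by
      refine List.filter_congr ?_
      intro i hi
      have hi' := PySem.List.mem_pyRange_one.mp hi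
      have := pv_mem_occ_iff snake_positions width height i hh hi'.1 hi'.2
      by_cases hcase : i ∈ idxs
      · have ha : occ.contains i = true := by simpa using (hmemocc i).mpr hcase
        have hb : snake_positions.contains (i / height, i % height) = true := by
          simpa using this.mp hcase
        rw [ha, hb]
      · have h1 : i ∉ occ := fun h => hcase ((hmemocc i).mp h)
        have h2 : (i / height, i % height) ∉ snake_positions := fun h => hcase (this.mpr h)
        have ha : occ.contains i = false := by simpa using h1
        have hb : snake_positions.contains (i / height, i % height) = false := by simpa using h2
        rw [ha, hb]
    rw [hfilter]
    -- turn the index map into the grid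
    have hwn : width = ((width.toNat : Nat) : Int) := by omega
    rw [show (fun i => !snake_positions.contains (i / height, i % height))
        = ((fun p => !snake_positions.contains p) ∘ (fun i => (i / height, i % height))) from rfl]
    rw [← List.filter_map, hwn, ← grid_eq_map height hh width.toNat]

-- ===== VERDICT (by name: the statement is the Claim_ definition above) =====
theorem get_free_positions_spec : Claim_equal_get_free_positions := by
  intro snake_positions grid_size _
  unfold Spec_get_free_positions
  obtain ⟨width, height⟩ := grid_size
  rw [portA_eq_filter_grid, portB_eq_filter_grid]
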